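-- pv_equiv track=rewrite | github.com/zerlkung/SMPCTool-PS4_python | smps4tool.py | sm_hash
-- ===== SOURCE A (Python) =====
-- _SM_TABLE = (
--     0x0000000000000000,0xb32e4cbe03a75f6f,0xf4843657a840a05b,0x47aa7ae9abe7ff34,
--     0x7bd0c384ff8f5e33,0xc8fe8f3afc28015c,0x8f54f5d357cffe68,0x3c7ab96d5468a107,
--     0xf7a18709ff1ebc66,0x448fcbb7fcb9e309,0x0325b15e575e1c3d,0xb00bfde054f94352,
--     0x8c71448d0091e255,0x3f5f08330336bd3a,0x78f572daa8d1420e,0xcbdb3e64ab761d61,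
--     0x7d9ba13851336649,0xceb5ed8652943926,0x891f976ff973c612,0x3a31dbd1fad4997d,
--     0x064b62bcaebc387a,0xb5652e02ad1b6715,0xf2cf54eb06fc9821,0x41e11855055bc74e,
--     0x8a3a2631ae2dda2f,0x39146a8fad8a8540,0x7ebe1066066d7a74,0xcd905cd805ca251b,
--     0xf1eae5b551a2841c,0x42c4a90b5205db73,0x056ed3e2f9e22447,0xb6409f5cfa457b28,
--     0xfb374270a266cc92,0x48190ecea1c193fd,0x0fb374270a266cc9,0xbc9d3899098133a6,
--     0x80e781f45de992a1,0x33c9cd4a5e4ecdce,0x7463b7a3f5a932fa,0xc74dfb1df60e6d95,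
--     0x0c96c5795d7870f4,0xbfb889c75edf2f9b,0xf812f32ef538d0af,0x4b3cbf90f69f8fc0,
--     0x774606fda2f72ec7,0xc4684a43a15071a8,0x83c230aa0ab78e9c,0x30ec7c140910d1f3,
--     0x86ace348f355aadb,0x3582aff6f0f2f5b4,0x7228d51f5b150a80,0xc10699a158b255ef,
--     0xfd7c20cc0cdaf4e8,0x4e526c720f7dab87,0x09f8169ba49a54b3,0xbad65a25a73d0bdc,
--     0x710d64410c4b16bd,0xc22328ff0fec49d2,0x85895216a40bb6e6,0x36a71ea8a7ace989,
--     0x0adda7c5f3c4488e,0xb9f3eb7bf06317e1,0xfe5991925b84e8d5,0x4d77dd2c5823b7ba,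
--     0x64b62bcaebc387a1,0xd7986774e864d8ce,0x90321d9d438327fa,0x231c512340247895,
--     0x1f66e84e144cd992,0xac48a4f017eb86fd,0xebe2de19bc0c79c9,0x58cc92a7bfab26a6,
--     0x9317acc314dd3bc7,0x2039e07d177a64a8,0x67939a94bc9d9b9c,0xd4bdd62abf3ac4f3,
--     0xe8c76f47eb5265f4,0x5be923f9e8f53a9b,0x1c4359104312c5af,0xaf6d15ae40b59ac0,
--     0x192d8af2baf0e1e8,0xaa03c64cb957be87,0xeda9bca512b041b3,0x5e87f01b11171edc,
--     0x62fd4976457fbfdb,0xd1d305c846d8e0b4,0x96797f21ed3f1f80,0x2557339fee9840ef,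
--     0xee8c0dfb45ee5d8e,0x5da24145464902e1,0x1a083bacedaefdd5,0xa9267712ee09a2ba,
--     0x955cce7fba6103bd,0x267282c1b9c65cd2,0x61d8f8281221a3e6,0xd2f6b4961186fc89,
--     0x9f8169ba49a54b33,0x2caf25044a02145c,0x6b055fede1e5eb68,0xd82b1353e242b407,
--     0xe451aa3eb62a1500,0x577fe680b58d4a6f,0x10d59c691e6ab55b,0xa3fbd0d71dcdea34,
--     0x6820eeb3b6bbf755,0xdb0ea20db51ca83a,0x9ca4d8e41efb570e,0x2f8a945a1d5c0861,
--     0x13f02d374934a966,0xa0de61894a93f609,0xe7741b60e174093d,0x545a57dee2d35652,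
--     0xe21ac88218962d7a,0x5134843c1b317215,0x169efed5b0d68d21,0xa5b0b26bb371d24e,
--     0x99ca0b06e7197349,0x2ae447b8e4be2c26,0x6d4e3d514f59d312,0xde6071ef4cfe8c7d,
--     0x15bb4f8be788911c,0xa6950335e42fce73,0xe13f79dc4fc83147,0x521135624c6f6e28,
--     0x6e6b8c0f1807cf2f,0xdd45c0b11ba09040,0x9aefba58b0476f74,0x29c1f6e6b3e0301b,
--     0xc96c5795d7870f42,0x7a421b2bd420502d,0x3de861c27fc7af19,0x8ec62d7c7c60f076,
--     0xb2bc941128085171,0x0192d8af2baf0e1e,0x4638a2468048f12a,0xf516eef883efae45,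
--     0x3ecdd09c2899b324,0x8de39c222b3eec4b,0xca49e6cb80d9137f,0x7967aa75837e4c10,
--     0x451d1318d716ed17,0xf6335fa6d4b1b278,0xb199254f7f564d4c,0x02b769f17cf11223,
--     0xb4f7f6ad86b4690b,0x07d9ba1385133664,0x4073c0fa2ef4c950,0xf35d8c442d53963f,
--     0xcf273529793b3738,0x7c0979977a9c6857,0x3ba3037ed17b9763,0x888d4fc0d2dcc80c,
--     0x435671a479aad56d,0xf0783d1a7a0d8a02,0xb7d247f3d1ea7536,0x04fc0b4dd24d2a59,
--     0x3886b22086258b5e,0x8ba8fe9e8582d431,0xcc0284772e652b05,0x7f2cc8c92dc2746a,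
--     0x325b15e575e1c3d0,0x8175595b76469cbf,0xc6df23b2dda1638b,0x75f16f0cde063ce4,
--     0x498bd6618a6e9de3,0xfaa59adf89c9c28c,0xbd0fe036222e3db8,0x0e21ac88218962d7,
--     0xc5fa92ec8aff7fb6,0x76d4de52895820d9,0x317ea4bb22bfdfed,0x8250e80521188082,
--     0xbe2a516875702185,0x0d041dd676d77eea,0x4aae673fdd3081de,0xf9802b81de97deb1,
--     0x4fc0b4dd24d2a599,0xfceef8632775faf6,0xbb44828a8c9205c2,0x086ace348f355aad,
--     0x34107759db5dfbaa,0x873e3be7d8faa4c5,0xc094410e731d5bf1,0x73ba0db070ba049e,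
--     0xb86133d4dbcc19ff,0x0b4f7f6ad86b4690,0x4ce50583738cb9a4,0xffcb493d702be6cb,
--     0xc3b1f050244347cc,0x709fbcee27e418a3,0x3735c6078c03e797,0x841b8ab98fa4b8f8,
--     0xadda7c5f3c4488e3,0x1ef430e13fe3d78c,0x595e4a08940428b8,0xea7006b697a377d7,
--     0xd60abfdbc3cbd6d0,0x6524f365c06c89bf,0x228e898c6b8b768b,0x91a0c532682c29e4,
--     0x5a7bfb56c35a3485,0xe955b7e8c0fd6bea,0xaeffcd016b1a94de,0x1dd181bf68bdcbb1,
--     0x21ab38d23cd56ab6,0x9285746c3f7235d9,0xd52f0e859495caed,0x6601423b97329582,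
--     0xd041dd676d77eeaa,0x636f91d96ed0b1c5,0x24c5eb30c5374ef1,0x97eba78ec690119e,
--     0xab911ee392f8b099,0x18bf525d915feff6,0x5f1528b43ab810c2,0xec3b640a391f4fad,
--     0x27e05a6e926952cc,0x94ce16d091ce0da3,0xd3646c393a29f297,0x604a2087398eadf8,
--     0x5c3099ea6de60cff,0xef1ed5546e415390,0xa8b4afbdc5a6aca4,0x1b9ae303c601f3cb,
--     0x56ed3e2f9e224471,0xe5c372919d851b1e,0xa26908783662e42a,0x114744c635c5bb45,
--     0x2d3dfdab61ad1a42,0x9e13b115620a452d,0xd9b9cbfcc9edba19,0x6a978742ca4ae576,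
--     0xa14cb926613cf817,0x1262f598629ba778,0x55c88f71c97c584c,0xe6e6c3cfcadb0723,
--     0xda9c7aa29eb3a624,0x69b2361c9d14f94b,0x2e184cf536f3067f,0x9d36004b35545910,
--     0x2b769f17cf112238,0x9858d3a9ccb67d57,0xdff2a94067518263,0x6cdce5fe64f6dd0c,
--     0x50a65c93309e7c0b,0xe388102d33392364,0xa4226ac498dedc50,0x170c267a9b79833f,
--     0xdcd7181e300f9e5e,0x6ff954a033a8c131,0x28532e49984f3e05,0x9b7d62f79be8616a,
--     0xa707db9acf80c06d,0x14299724cc279f02,0x5383edcd67c06036,0xe0ada17364673f59,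
-- )
--
-- def sm_hash(path: str) -> int:
--     """Insomniac Games asset hash. Case-insensitive, path-separator normalised."""
--     SEP = 0x2f
--     h   = 0xc96c5795d7870f42
--     i   = 0
--     raw = path.encode('ascii', errors='replace')
--     while i < len(raw):
--         c = raw[i]
--         if c == 0x5c or c == SEP:
--             while i < len(raw) and (raw[i] == 0x5c or raw[i] == SEP):
--                 i += 1
--             c = SEP
--         else:
--             i += 1
--             if 0x41 <= c <= 0x5A:
--                 c += 0x20
--         h = _SM_TABLE[(h & 0xFF) ^ c] ^ (h >> 8)
--     return (h >> 2) | 0x8000000000000000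
-- ===== SOURCE B (Python) =====
-- def sm_hash(path: str) -> int:
--     """Table-free variant: normalize bytes in a first pass, then compute the
--     CRC bitwise (8 shift/xor rounds per byte with the reflected polynomial)
--     instead of the precomputed 256-entry table."""
--     POLY = 0xC96C5795D7870F42
--     raw = path.encode('ascii', errors='replace')
--     norm = bytearray()
--     for c in raw:
--         if c == 0x5c or c == 0x2f:
--             if not (norm and norm[-1] == 0x2f):
--                 norm.append(0x2f)
--         elif 0x41 <= c <= 0x5A:
--             norm.append(c + 0x20)
--         else:
--             norm.append(c)
--     h = 0xc96c5795d7870f42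
--     for c in norm:
--         h ^= c
--         for _ in range(8):
--             h = (h >> 1) ^ (POLY if h & 1 else 0)
--     return (h >> 2) | 0x8000000000000000
-- ===== Notes on version B (the rewrite author's own statement) =====
-- stated objective: alternative
-- what changed: A's single interleaved loop (inner while skipping separator runs, 256-entry lookup table) is replaced by two passes with no table at all: first build a normalized bytearray (separator runs collapsed to one '/', uppercase lowered), then compute the CRC bitwise with 8 shift/xor rounds per byte using the reflected polynomial 0xC96C5795D7870F42.
import Mathlib
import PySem

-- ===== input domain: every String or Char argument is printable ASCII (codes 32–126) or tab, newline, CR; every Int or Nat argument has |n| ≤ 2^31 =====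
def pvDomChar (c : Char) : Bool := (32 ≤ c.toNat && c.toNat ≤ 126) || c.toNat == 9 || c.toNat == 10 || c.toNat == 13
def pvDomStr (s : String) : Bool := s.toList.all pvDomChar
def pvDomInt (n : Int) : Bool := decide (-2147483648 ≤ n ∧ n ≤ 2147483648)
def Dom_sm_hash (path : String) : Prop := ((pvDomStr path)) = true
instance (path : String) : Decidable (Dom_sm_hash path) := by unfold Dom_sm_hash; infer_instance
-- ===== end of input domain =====

set_option maxRecDepth 10000

-- B replaces A's single interleaved loop (inner while skipping separator runs, 256-entry table lookup)
-- by two passes with no table: build a normalized byte list, then compute the CRC bitwise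
-- (8 shift/xor rounds per byte with the reflected polynomial). Same value; not claimed faster.

-- byte-for-byte ASCII encoding (errors='replace' → 63 = '?'); shared by both ports
def pvByte (ch : Char) : Nat := if ch.toNat < 128 then ch.toNat else 63

-- ===== PORT A =====
def smTable : List Nat := [
  0,12911341560706588527,17619267392293085275,5164075066763771700,
  8921845837811637811,14483170935171449180,10328150133527543400,4357999468653093127,
  17843691675623275622,4940391307328217865,226782375002905661,12685511915359257426,
  10119945210068853333,4566377562367245626,8715998937306186254,14689403211693301089,
  9051005139383707209,14895072503764629798,9880782614656435730,4193374422961527165,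
  453564750005811322,13070904082541799189,17496296445768931361,4747102235666401102,
  9960315520700766767,4113029525020509504,9132755124734491252,14812441257301386523,
  17431997874612372508,4811156168024382323,391483189436228679,13132671735097031464,
  18102010278767414418,5195199925788447741,1131375642422963401,13591081480414639014,
  9288535643022529185,3731739485546663374,8386748845923054330,14361410892855143829,
  907129500011622644,13814943346342178715,17875617253995106479,5421418680781082560,
  8594564625313771207,14152643483341451688,9494204471332802204,3525329033817543155,
  9704381199536204507,3855837706121835956,8226059050041019008,13908973417437222383,
  18265510249468982504,5643692520190618503,718348998302913715,13463047253836762076,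
  8146277531524994749,13989069943491807698,9622312336048764646,3938150108875254153,
  782966378872457358,13399312233903888353,18327840216347633877,5582173445676054458,
  7257036000092981153,15535280666427316430,10390399851576895482,2529986302517213333,
  2262751284845926802,12414353723947190013,16997392145760156105,6398650419759490726,
  10599130201908394951,2322133910755632296,7463478971093326748,15329644185724306675,
  16773497691846108660,6622864283287239323,2036569382881248687,12640783567252986560,
  1814259000023245288,12250853444207230599,17125426475222188467,6811676960462675676,
  7132938157145702363,15119434731753103540,10842837361562165120,2690676064372932847,
  17189129250627542414,6747026957542163169,1875814858707893717,12188560364711551674,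
  10762704257491731389,2770420489343360210,7050658067635086310,15201536148867841161,
  11493583972846619443,3219832958944941148,7711675412243671912,15576564987190227975,
  16452118100082038016,6305011443818121839,1213047649942025563,11816267669673208372,
  7503259434831574869,15784731923736995898,11287385040381237006,3425713581329221729,
  1436697996605827430,11591809733187859977,16677985422973077821,6078267261889762898,
  16292555063049989498,5851447209550246421,1630020308903038241,11939238787801010766,
  11081681957373440841,3090674103720225830,7876300217750508306,16023932746787097725,
  1565932757744914716,12003503911822413427,16230825569204842823,5913566482019610152,
  7956607163135676207,15944361922680361024,11164346891352108916,3008957496780927003,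
  14514072000185962306,8809633696146542637,4460922918905818905,10287960411460399222,
  12879331835779764593,113391187501452830,5059972605034426666,17660565739912801861,
  4525502569691853604,10224187249629523019,14576435430675780479,8748148222884465680,
  4980157760350383383,17740628527280140920,12797300839518981452,195741594718114339,
  13040162471224305931,565687821211481700,4644267821511264592,17536326748496696895,
  14926957942186653496,8937808626997553239,4297282312656885603,9839608450464401420,
  4852190599768102253,17327666750234135042,13245728566574478646,359174499151456857,
  4073138765762497374,10063573324157604913,14700457781105076997,9163920108173816938,
  3628518000046490576,9328460452529085631,14330211790445699979,8498696072880078052,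
  5299565100954197475,18061012165519327884,13623353920925351352,1018284691440624343,
  14265876314291404726,8562713237611094233,3566469078572851181,9390260331795218562,
  13702854325316886917,937907429353946858,5381352128745865694,17978417549248290481,
  5746791986423309721,18225777846762470134,13494053915084326338,606523824971012781,
  3751629717415787434,9745292510640121029,13876787882151992305,8338992711486538910,
  13285957365033343487,815010154451519120,5540840978686720420,18431906428167644875,
  14101316135270172620,8115412784602421411,3978303581567838103,9519354766961195256,
  12527462061959317731,2230461459452909452,6439665917889882296,16893009583564617687,
  15423350824487343824,7288217715337890239,2490078880175191691,10493603952060017124,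
  6520081235612152965,16813546994155744234,12610022887636243678,2148641156328442801,
  2426095299884051126,10557972909709735385,15361512820870335213,7350228890552538498,
  15006518869663149738,7165105895222849989,2649782550477098737,10947027550912647582,
  12362696414880903321,1783234539286425590,6851427162658443458,17022309211647725485,
  2873395993211654860,10722532847870938531,15232418832718623383,6938393941075996152,
  6642978682516671743,17230443782969840528,12156534523779525796,1989151790783919051,
  6263731030979658865,16556202624882645790,11702894419100492842,1245039440087595845,
  3260040617806076482,11390642587947386157,15688795063501830681,7680756410435167606,
  11622868312827688983,1324891275238549368,6181348207440451660,16638201170595874595,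
  15752600435501016612,7616209416359311691,3321489341258335871,11328242235714328848,
  3131865515489829432,10977756817953029463,16137146508898304611,7844397531750915340,
  5811434156413844491,16395372229761246052,11827132964039220304,1660744670629167935,
  15913214326271352414,8068573254449152305,2905717078206922245,11204220263579804010,
  12035829987123708013,1452858539103461122,6017914993561854006,16189773752444600153
]

def smStep (h c : Nat) : Nat := smTable.getD ((h &&& 255) ^^^ c) 0 ^^^ (h >>> 8)

-- the while loop of A: on a separator byte the inner while consumes the whole run
def smLoopA : List Nat → Nat → Nat
  | [], h => h
  | c :: rest, h =>
    if c == 92 || c == 47 then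
      smLoopA ((c :: rest).dropWhile (fun b => b == 92 || b == 47)) (smStep h 47)
    else
      smLoopA rest (smStep h (if 65 ≤ c && c ≤ 90 then c + 32 else c))
termination_by l _ => l.length
decreasing_by
  all_goals simp only [List.dropWhile_cons, List.length_cons]
  all_goals simp_all
  all_goals exact List.length_dropWhile_le _ _

def sm_hash (path : String) : Int :=
  ((smLoopA ((path.toList.map pvByte)) 0xc96c5795d7870f42 >>> 2) ||| 0x8000000000000000 : Nat)

-- ===== PORT B =====
-- first pass of B: normalized byte list (separator runs collapsed via a look-at-last check, letters lowered)
def smNormB (raw : List Nat) : List Nat :=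
  raw.foldl (fun norm c =>
    if c == 92 || c == 47 then
      if norm.getLast? == some 47 then norm else norm ++ [47]
    else if 65 ≤ c && c ≤ 90 then norm ++ [c + 32]
    else norm ++ [c]) []

def smPoly : Nat := 0xC96C5795D7870F42

-- one bitwise CRC round: h = (h >> 1) ^ (POLY if h & 1 else 0)
def smRound (h : Nat) : Nat := (h >>> 1) ^^^ (if h &&& 1 == 1 then smPoly else 0)

-- second pass of B: h ^= c, then 8 bitwise rounds, per byte
def smStepB (h c : Nat) : Nat := (List.range 8).foldl (fun h _ => smRound h) (h ^^^ c)

def sm_hash_alt (path : String) : Int :=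
  ((((smNormB (path.toList.map pvByte)).foldl smStepB 0xc96c5795d7870f42) >>> 2) ||| 0x8000000000000000 : Nat)

-- ===== PRECONDITION & SPEC =====
def Spec_sm_hash (path : String) (out : Int) : Prop := out = sm_hash_alt path
instance (path : String) (out : Int) : Decidable (Spec_sm_hash path out) := by unfold Spec_sm_hash; infer_instance

-- ===== CLAIM (what is proved, stated in full; the proofs are below) =====
def Claim_equal_sm_hash : Prop := ∀ (path : String), Dom_sm_hash path → Spec_sm_hash path (sm_hash path)

-- ===== LEMMAS AND PROOFS =====
-- common normalized form, written with A's run-skip shape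
def normSpec : List Nat → List Nat
  | [] => []
  | c :: rest =>
    if c == 92 || c == 47 then
      47 :: normSpec ((c :: rest).dropWhile (fun b => b == 92 || b == 47))
    else
      (if 65 ≤ c && c ≤ 90 then c + 32 else c) :: normSpec rest
termination_by l => l.length
decreasing_by
  all_goals simp only [List.dropWhile_cons, List.length_cons]
  all_goals simp_all
  all_goals exact List.length_dropWhile_le _ _

theorem smLoopA_eq_fold (l : List Nat) (h : Nat) :
    smLoopA l h = (normSpec l).foldl smStep h := by
  fun_induction smLoopA l h with
  | case1 h => simp [normSpec]
  | case2 c rest h hc ih =>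
      rw [normSpec]
      simpa [hc] using ih
  | case3 c rest h hc ih =>
      rw [normSpec]
      simpa [hc] using ih

-- B's first pass, with the "previous byte was a separator" flag made explicit
def normPrev : List Nat → Bool → List Nat
  | [], _ => []
  | c :: rest, p =>
    if c == 92 || c == 47 then
      if p then normPrev rest true else 47 :: normPrev rest true
    else
      (if 65 ≤ c && c ≤ 90 then c + 32 else c) :: normPrev rest false

theorem normPrev_eq_normSpec (l : List Nat) :
    normPrev l true = normSpec (l.dropWhile (fun b => b == 92 || b == 47)) ∧
    normPrev l false = normSpec l := by
  induction l with
  | nil => simp [normPrev]; rw [normSpec]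
  | cons c rest ih =>
      by_cases hc : (c == 92 || c == 47) = true
      · constructor
        · rw [normPrev]
          simp [hc, ih.1]
        · rw [normPrev, normSpec]
          simp [hc, ih.1]
      · constructor
        · rw [normPrev]
          simp only [hc, List.dropWhile_cons, Bool.false_eq_true, if_false]
          rw [normSpec]
          simp [hc, ih.2]
        · rw [normPrev, normSpec]
          simp [hc, ih.2]

theorem smNormB_go (l : List Nat) (acc : List Nat) :
    l.foldl (fun norm c =>
      if c == 92 || c == 47 then
        if norm.getLast? == some 47 then norm else norm ++ [47]
      else if 65 ≤ c && c ≤ 90 then norm ++ [c + 32]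
      else norm ++ [c]) acc
    = acc ++ normPrev l (acc.getLast? == some 47) := by
  induction l generalizing acc with
  | nil => simp [normPrev]
  | cons c rest ih =>
      simp only [List.foldl_cons]
      by_cases hc : (c == 92 || c == 47) = true
      · by_cases hp : (acc.getLast? == some 47) = true
        · rw [if_pos hc, if_pos hp, ih, hp]
          simp [normPrev, hc]
        · have hp' : (acc.getLast? == some 47) = false := by simp_all
          rw [if_pos hc, hp', if_neg (by simp), ih, List.getLast?_concat]
          simp [normPrev, hc]
      · have hc47 : c ≠ 47 := by intro h; subst h; simp at hc
        rw [if_neg hc]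
        by_cases hl : (65 ≤ c && c ≤ 90) = true
        · have h65 : 65 ≤ c := by
            have h := hl; simp at h; exact h.1
          rw [if_pos hl, ih, List.getLast?_concat]
          have hne : (some (c + 32) == some (47 : Nat)) = false := by
            simp; omega
          rw [hne]
          simp [normPrev, hc, hl]
        · rw [if_neg hl, ih, List.getLast?_concat]
          have hne : (some c == some (47 : Nat)) = false := by simp [hc47]
          rw [hne]
          simp [normPrev, hc, hl]

theorem smNormB_eq_normSpec (raw : List Nat) : smNormB raw = normSpec raw := by
  rw [smNormB, smNormB_go]
  simpa using (normPrev_eq_normSpec raw).2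

-- ===== CRC: the bitwise rounds compute exactly the table step =====
def smRound8 (z : Nat) : Nat := smRound (smRound (smRound (smRound (smRound (smRound (smRound (smRound z)))))))

theorem smStepB_eq_round8 (h c : Nat) : smStepB h c = smRound8 (h ^^^ c) := by
  simp [smStepB, smRound8, List.range_succ]

-- one round is XOR-linear
theorem smRound_xor (a b : Nat) : smRound (a ^^^ b) = smRound a ^^^ smRound b := by
  unfold smRound
  rw [Nat.shiftRight_xor_distrib, Nat.and_xor_distrib_right]
  rcases Nat.and_one_is_mod a ▸ Nat.mod_two_eq_zero_or_one a with ha | ha <;>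
    rcases Nat.and_one_is_mod b ▸ Nat.mod_two_eq_zero_or_one b with hb | hb <;>
      simp [ha, hb, Nat.xor_comm, Nat.xor_left_comm]

theorem smRound8_xor (a b : Nat) : smRound8 (a ^^^ b) = smRound8 a ^^^ smRound8 b := by
  unfold smRound8
  rw [smRound_xor, smRound_xor, smRound_xor, smRound_xor, smRound_xor, smRound_xor, smRound_xor, smRound_xor]

-- shifting an even number right one round drops the poly
theorem smRound_two_mul (m : Nat) : smRound (2 * m) = m := by
  unfold smRound
  have h1 : (2 * m) &&& 1 = 0 := by
    rw [Nat.and_one_is_mod]; omega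
  have h2 : (2 * m) >>> 1 = m := by
    rw [Nat.shiftRight_one]; omega
  simp [h1, h2]

theorem smRound8_mul_256 (m : Nat) : smRound8 (256 * m) = m := by
  unfold smRound8
  have : ∀ k, 2 * k * m = 2 * (k * m) := by intro k; ring
  rw [show (256 : Nat) * m = 2 * (128 * m) by ring, smRound_two_mul,
      show (128 : Nat) * m = 2 * (64 * m) by ring, smRound_two_mul,
      show (64 : Nat) * m = 2 * (32 * m) by ring, smRound_two_mul,
      show (32 : Nat) * m = 2 * (16 * m) by ring, smRound_two_mul,
      show (16 : Nat) * m = 2 * (8 * m) by ring, smRound_two_mul,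
      show (8 : Nat) * m = 2 * (4 * m) by ring, smRound_two_mul,
      show (4 : Nat) * m = 2 * (2 * m) by ring, smRound_two_mul,
      smRound_two_mul]

-- split x into its low byte XOR its high part
theorem xor_split_256 (x : Nat) : x = (x &&& 255) ^^^ (256 * (x >>> 8)) := by
  have hsh : 256 * (x >>> 8) = (x >>> 8) <<< 8 := by
    rw [Nat.shiftLeft_eq]
    norm_num [Nat.mul_comm]
  apply Nat.eq_of_testBit_eq
  intro i
  rw [Nat.testBit_xor, Nat.testBit_and,
      show (255 : Nat) = 2 ^ 8 - 1 by norm_num, Nat.testBit_two_pow_sub_one,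
      hsh, Nat.testBit_shiftLeft, Nat.testBit_shiftRight]
  by_cases hi : i < 8
  · simp [hi, Nat.not_le.mpr hi]
  · have hle : 8 ≤ i := Nat.not_lt.mp hi
    have hadd : 8 + (i - 8) = i := by omega
    simp [hi, hle, hadd]

theorem smRound8_decompose (x : Nat) :
    smRound8 x = smRound8 (x &&& 255) ^^^ (x >>> 8) := by
  conv_lhs => rw [xor_split_256 x]
  rw [smRound8_xor, smRound8_mul_256]

-- the 256 table entries are exactly round8 of the byte
theorem smTable_eq : ((List.range 256).all (fun r => smRound8 r == smTable.getD r 0)) = true := by decide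

theorem smRound8_lt_256 (t : Nat) (ht : t < 256) : smRound8 t = smTable.getD t 0 := by
  have h := smTable_eq
  rw [List.all_eq_true] at h
  have := h t (List.mem_range.mpr ht)
  simpa using this

-- the per-byte steps agree for byte values < 256
theorem smStepB_eq_smStep (h c : Nat) (hc : c < 256) : smStepB h c = smStep h c := by
  rw [smStepB_eq_round8, smRound8_decompose]
  have hlow : (h ^^^ c) &&& 255 = (h &&& 255) ^^^ c := by
    rw [Nat.and_xor_distrib_right]
    congr 1
    have := Nat.and_two_pow_sub_one_eq_mod c 8
    simp at this
    omega
  have hhigh : (h ^^^ c) >>> 8 = h >>> 8 := by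
    rw [Nat.shiftRight_xor_distrib, Nat.shiftRight_eq_zero c 8 hc, Nat.xor_zero]
  have ht : (h &&& 255) ^^^ c < 256 := by
    have h1 : h &&& 255 < 256 := by
      have := Nat.and_two_pow_sub_one_eq_mod h 8
      simp at this
      omega
    have := Nat.xor_lt_two_pow (n := 8) h1 hc
    simpa using this
  rw [hlow, hhigh, smRound8_lt_256 _ ht, smStep]

-- the folds agree when every byte is < 256
theorem foldl_stepB_eq (l : List Nat) (h : Nat) (hl : ∀ x ∈ l, x < 256) :
    l.foldl smStepB h = l.foldl smStep h := by
  induction l generalizing h with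
  | nil => rfl
  | cons c rest ih =>
      simp only [List.foldl_cons]
      rw [smStepB_eq_smStep h c (hl c (by simp)), ih _ (fun x hx => hl x (by simp [hx]))]

-- elements of the normalized list stay < 256
theorem normSpec_lt (l : List Nat) (hl : ∀ x ∈ l, x < 256) : ∀ x ∈ normSpec l, x < 256 := by
  fun_induction normSpec l with
  | case1 => simp
  | case2 c rest hc ih =>
      intro x hx
      rcases List.mem_cons.mp hx with rfl | hx
      · omega
      · exact ih (fun y hy => hl y (List.Sublist.mem hy (List.dropWhile_sublist _))) x hx
  | case3 c rest hc ih =>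
      intro x hx
      have hcl : c < 256 := hl c (by simp)
      rcases List.mem_cons.mp hx with rfl | hx
      · split <;> simp_all <;> omega
      · exact ih (fun y hy => hl y (by simp [hy])) x hx

theorem pvByte_lt (ch : Char) : pvByte ch < 256 := by
  unfold pvByte; split <;> omega

-- ===== VERDICT (by name: the statement is the Claim_ definition above) =====
theorem sm_hash_spec : Claim_equal_sm_hash := by
  intro path _
  unfold Spec_sm_hash sm_hash sm_hash_alt
  have hb : ∀ x ∈ (path.toList.map pvByte), x < 256 := by
    intro x hx
    simp only [List.mem_map] at hx
    obtain ⟨ch, _, rfl⟩ := hx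
    exact pvByte_lt ch
  rw [smNormB_eq_normSpec, smLoopA_eq_fold, foldl_stepB_eq _ _ (normSpec_lt _ hb)]
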